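-- pv_equiv track=rewrite | github.com/kanoto/pokemon-hidden-ability-alfred-workflow | query.py | parentheses_remover
-- ===== SOURCE A (Python) =====
-- def parentheses_remover(s):
--     s = s.strip()
--     nobk = True
--     while nobk:
--         nobk = False
--         if s.startswith('['):
--             s = s[1:s.rfind(']')]
--             nobk = True
--         if s.startswith('![img]('):
--             s = s[len('![img]('):s.rfind(')')]
--             nobk = True
--         if not nobk:
--             break
--     return s
-- ===== SOURCE B (Python) =====
-- def _cut(t, lo, hi, k, close):
--     # advance the window past a k-char opener, cutting at the last `close`
--     # inside t[lo:hi] (python's end-relative -1 rule when absent)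
--     j = t.rfind(close, lo, hi)
--     lo += k
--     hi = max(hi - 1 if j == -1 else j, lo)
--     return lo, hi
--
-- def parentheses_remover(s):
--     # two-pointer version: keep a window [lo, hi) into the stripped string
--     # and move the indices; no intermediate substring is ever built
--     t = s.strip()
--     lo, hi = 0, len(t)
--     changed = True
--     while changed:
--         changed = False
--         if t.startswith('[', lo, hi):
--             lo, hi = _cut(t, lo, hi, 1, ']')
--             changed = True
--         if t.startswith('![img](', lo, hi):
--             lo, hi = _cut(t, lo, hi, 7, ')')
--             changed = True
--     return t[lo:hi]
-- ===== Notes on version B (the rewrite author's own statement) =====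
-- stated objective: alternative
-- what changed: A repeatedly rebuilds the current string by slicing (s = s[1:s.rfind(']')] etc.) each pass; B never builds an intermediate substring: it keeps the stripped string intact and moves a two-pointer index window [lo, hi) using range-bounded str.startswith(p, lo, hi) and str.rfind(c, lo, hi), slicing once at the end.
import Mathlib
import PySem

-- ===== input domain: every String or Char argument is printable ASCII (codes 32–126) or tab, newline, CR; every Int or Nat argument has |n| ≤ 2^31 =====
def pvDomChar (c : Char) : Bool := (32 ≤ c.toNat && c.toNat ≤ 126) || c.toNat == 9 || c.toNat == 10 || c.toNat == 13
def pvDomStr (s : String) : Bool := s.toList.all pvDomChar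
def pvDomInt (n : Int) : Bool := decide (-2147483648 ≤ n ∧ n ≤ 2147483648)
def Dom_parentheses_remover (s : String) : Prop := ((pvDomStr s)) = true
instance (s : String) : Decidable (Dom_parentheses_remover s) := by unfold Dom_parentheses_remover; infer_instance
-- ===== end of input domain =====

-- B replaces A's repeated substring slicing by a two-pointer window [lo, hi) of indices
-- into the stripped string, so no intermediate substring is ever built (objective: alternative).

-- ===== PORT A =====
-- A works on the current substring s, rebuilt by slicing each pass.
-- s[1:s.rfind(']')] / s[len('![img]('):s.rfind(')')], on char lists
def pvPeelBkA (c : List Char) : List Char :=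
  PySem.Chars.slice c (some 1) (some (PySem.Chars.rfind c [']']))

def pvPeelImgA (c : List Char) : List Char :=
  PySem.Chars.slice c (some 7) (some (PySem.Chars.rfind c [')']))

-- the while loop: each iteration does the '[' check, then the '![img](' check on the
-- (possibly updated) string, and repeats while nobk was set; fuel = len + 1 is a pure
-- totality guard (each pass strictly shortens the string, so it is never exhausted)
def pvLoopA : Nat -> List Char -> List Char
  | 0, c => c
  | fuel + 1, c =>
    if PySem.Chars.startswith c ['['] = true then
      let c1 := pvPeelBkA c
      if PySem.Chars.startswith c1 ['!', '[', 'i', 'm', 'g', ']', '('] = true then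
        pvLoopA fuel (pvPeelImgA c1)
      else
        pvLoopA fuel c1
    else if PySem.Chars.startswith c ['!', '[', 'i', 'm', 'g', ']', '('] = true then
      pvLoopA fuel (pvPeelImgA c)
    else c

def parentheses_remover (s : String) : String :=
  String.ofList (pvLoopA ((PySem.Str.strip s).toList.length + 1) (PySem.Str.strip s).toList)

-- ===== PORT B =====
-- hand port of python's t.startswith(p, lo, hi); exact for the only calls Source B makes,
-- 0 ≤ lo and 0 ≤ hi (python then compares p against t[lo:hi], i.e. (t.take hi).drop lo)
def pvSwFrom (t p : List Char) (lo hi : Nat) : Bool :=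
  decide (p <+: (t.take hi).drop lo)

-- _cut: j = t.rfind(close, lo, hi); lo += k; hi = max(hi - 1 if j == -1 else j, lo)
def pvCut (t : List Char) (lo hi k : Nat) (close : Char) : Nat × Nat :=
  let j := PySem.Chars.rfindFrom t [close] (lo : Int) (some (hi : Int))
  let lo' := lo + k
  (lo', (max (if j = -1 then (hi : Int) - 1 else j) (lo' : Int)).toNat)

-- the while loop on the index window, transliterating Source B pass for pass
-- (same totality fuel as A's port; the window strictly shrinks every pass)
def pvLoopB : Nat -> List Char -> Nat -> Nat -> List Char
  | 0, t, lo, hi => (t.take hi).drop lo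
  | fuel + 1, t, lo, hi =>
    if pvSwFrom t ['['] lo hi = true then
      let p := pvCut t lo hi 1 ']'
      if pvSwFrom t ['!', '[', 'i', 'm', 'g', ']', '('] p.1 p.2 = true then
        let q := pvCut t p.1 p.2 7 ')'
        pvLoopB fuel t q.1 q.2
      else
        pvLoopB fuel t p.1 p.2
    else if pvSwFrom t ['!', '[', 'i', 'm', 'g', ']', '('] lo hi = true then
      let q := pvCut t lo hi 7 ')'
      pvLoopB fuel t q.1 q.2
    else (t.take hi).drop lo

def parentheses_remover_alt (s : String) : String :=
  String.ofList
    (pvLoopB ((PySem.Str.strip s).toList.length + 1) (PySem.Str.strip s).toList 0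
      (PySem.Str.strip s).toList.length)

-- ===== PRECONDITION & SPEC =====
def Spec_parentheses_remover (s : String) (out : String) : Prop := out = parentheses_remover_alt s
instance (s : String) (out : String) : Decidable (Spec_parentheses_remover s out) := by unfold Spec_parentheses_remover; infer_instance

-- ===== CLAIM (what is proved, stated in full; the proofs are below) =====
def Claim_equal_parentheses_remover : Prop := ∀ (s : String), Dom_parentheses_remover s → Spec_parentheses_remover s (parentheses_remover s)

-- ===== LEMMAS AND PROOFS =====

-- bound on rfind's backward scan
theorem pvGo_bound (s : List Char) (c : Char) (m : Nat) :
    PySem.Chars.rfind.go s [c] m = -1 ∨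
      (0 ≤ PySem.Chars.rfind.go s [c] m ∧ PySem.Chars.rfind.go s [c] m ≤ (m : Int) ∧
        PySem.Chars.rfind.go s [c] m < (s.length : Int)) := by
  induction m with
  | zero =>
    rw [PySem.Chars.rfind.go]
    by_cases h : [c].isPrefixOf s = true
    · right
      rcases List.isPrefixOf_iff_prefix.mp h with ⟨u, hu⟩
      have hl := congrArg List.length hu
      simp at hl
      simp only [if_pos h]
      refine ⟨by omega, by omega, by omega⟩
    · left
      simp only [if_neg h]
  | succ j ih =>
    rw [PySem.Chars.rfind.go]
    by_cases h : [c].isPrefixOf (List.drop (j + 1) s) = true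
    · right
      rcases List.isPrefixOf_iff_prefix.mp h with ⟨u, hu⟩
      have hl := congrArg List.length hu
      simp at hl
      simp only [if_pos h]
      refine ⟨by omega, by omega, by omega⟩
    · simp only [if_neg h]
      rcases ih with h' | h'
      · left; exact h'
      · right; exact ⟨h'.1, by omega, h'.2.2⟩

theorem pvRfind_bound (s : List Char) (c : Char) :
    PySem.Chars.rfind s [c] = -1 ∨
      (0 ≤ PySem.Chars.rfind s [c] ∧ PySem.Chars.rfind s [c] < (s.length : Int)) := by
  rcases pvGo_bound s c s.length with h | h
  · left; simpa [PySem.Chars.rfind] using h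
  · right
    constructor
    · simpa [PySem.Chars.rfind] using h.1
    · simpa [PySem.Chars.rfind] using h.2.2

-- t.rfind(c, lo, hi) expressed through rfind on the window (t.take hi).drop lo
theorem pvRfindFrom_spec (t : List Char) (c : Char) (lo hi : Nat)
    (h : lo < min hi t.length) :
    PySem.Chars.rfindFrom t [c] (lo : Int) (some (hi : Int)) =
      (if PySem.Chars.rfind ((t.take hi).drop lo) [c] = -1 then -1
       else (lo : Int) + PySem.Chars.rfind ((t.take hi).drop lo) [c]) := by
  have htk : List.take (min (t.length : Int) (hi : Int)).toNat t = List.take hi t := by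
    rcases le_or_gt hi t.length with hle | hgt
    · have he : (min (t.length : Int) (hi : Int)).toNat = hi := by omega
      rw [he]
    · have he : (min (t.length : Int) (hi : Int)).toNat = t.length := by omega
      rw [he, List.take_length, List.take_of_length_le (by omega)]
  unfold PySem.Chars.rfindFrom
  have h1 : ¬ ((lo : Int) < 0) := by omega
  have h2 : (if (t.length : Int) < (hi : Int) then (t.length : Int)
      else if (hi : Int) < 0 then if (hi : Int) + (t.length : Int) < 0 then 0
        else (hi : Int) + (t.length : Int) else (hi : Int)) = min (t.length : Int) (hi : Int) := by
    split_ifs <;> omega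
  simp only [h2, if_neg h1]
  have h3 : ¬ (min (t.length : Int) (hi : Int) < (lo : Int)) := by omega
  rw [if_neg h3]
  have h4 : ((lo : Int)).toNat = lo := by omega
  rw [h4, htk]

-- python slice xs[k:-1] for k ≤ len(xs), as drop/take
theorem pvSliceToNegOne (xs : List Char) (k : Nat) (h : k ≤ xs.length) :
    PySem.List.slice xs (some (k : Int)) (some (-1)) = (xs.drop k).take (xs.length - 1 - k) := by
  simp only [PySem.List.slice, PySem.List.clampIdx_neg_one, PySem.List.clampIdx_natCast]
  have hm : min k xs.length = k := by omega
  rw [hm]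

-- one python peel step c[k:r] (r = c.rfind(close)) on the window c = (t.take hi).drop lo
-- IS the index move pvCut performs, and the window stays inside [lo, hi)
theorem pvStepEq (t : List Char) (lo hi k : Nat) (close : Char)
    (hlen : hi ≤ t.length) (hk : 1 ≤ k) (hkL : k ≤ hi - lo) :
    PySem.Chars.slice ((t.take hi).drop lo) (some (k : Int))
        (some (PySem.Chars.rfind ((t.take hi).drop lo) [close]))
      = (t.take (pvCut t lo hi k close).2).drop (pvCut t lo hi k close).1 ∧
    (pvCut t lo hi k close).1 ≤ (pvCut t lo hi k close).2 ∧
    (pvCut t lo hi k close).2 ≤ hi := by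
  have hwl : ((t.take hi).drop lo).length = hi - lo := by simp; omega
  have hrb := pvRfind_bound ((t.take hi).drop lo) close
  have hjr := pvRfindFrom_spec t close lo hi (by omega)
  set r := PySem.Chars.rfind ((t.take hi).drop lo) [close] with hr
  rw [hwl] at hrb
  rcases hrb with hneg | hpos
  · -- r = -1 : c[k:-1], the window end moves to hi - 1
    have hj : PySem.Chars.rfindFrom t [close] (lo : Int) (some (hi : Int)) = -1 := by
      rw [hjr, if_pos hneg]
    simp only [pvCut, hj, reduceIte]
    refine ⟨?_, by simp only [max_def]; split_ifs <;> omega, by simp only [max_def]; split_ifs <;> omega⟩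
    have hX : (max ((hi : Int) - 1) ((lo + k : Nat) : Int)).toNat = max (hi - 1) (lo + k) := by
      simp only [max_def]
      split_ifs <;> omega
    rw [hX, hneg, PySem.Chars.slice_eq_listSlice,
      pvSliceToNegOne _ k (by omega), hwl, List.drop_drop, List.take_drop, List.take_take]
    have hT : min (lo + k + (hi - lo - 1 - k)) hi = max (hi - 1) (lo + k) := by omega
    rw [hT]
  · -- 0 ≤ r < hi - lo : c[k:r], the window end moves to lo + r
    have hj : PySem.Chars.rfindFrom t [close] (lo : Int) (some (hi : Int)) = (lo : Int) + r := by
      rw [hjr, if_neg (by omega)]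
    have hrn : r = ((r.toNat : Nat) : Int) := by omega
    have hrlt : r.toNat < hi - lo := by omega
    simp only [pvCut, hj]
    rw [if_neg (by omega : ¬ ((lo : Int) + r = -1))]
    refine ⟨?_, by simp only [max_def]; split_ifs <;> omega, by simp only [max_def]; split_ifs <;> omega⟩
    have hX : (max ((lo : Int) + r) ((lo + k : Nat) : Int)).toNat = max (lo + r.toNat) (lo + k) := by
      simp only [max_def]
      split_ifs <;> omega
    rw [hX, PySem.Chars.slice_eq_listSlice, hrn, PySem.List.slice_natCast,
      List.drop_drop, List.take_drop, List.take_take]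
    have hT : min (lo + k + (r.toNat - k)) hi = max (lo + (r.toNat : Int).toNat) (lo + k) := by omega
    rw [hT]

-- python's t.startswith(p, lo, hi) is startswith on the window
theorem pvSwFrom_eq (t p : List Char) (lo hi : Nat) :
    pvSwFrom t p lo hi = PySem.Chars.startswith ((t.take hi).drop lo) p := by
  by_cases h : p <+: (t.take hi).drop lo
  · simp [pvSwFrom, h, (PySem.Chars.startswith_iff _ _).mpr h]
  · have : ¬ PySem.Chars.startswith ((t.take hi).drop lo) p = true := fun hc =>
      h ((PySem.Chars.startswith_iff _ _).mp hc)
    simp [pvSwFrom, h]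
    simp at this
    simp [this]

-- the two loops compute the same string on every well-formed window, fuel for fuel
theorem pvLoopB_eq (fuel : Nat) (t : List Char) (lo hi : Nat)
    (h1 : lo ≤ hi) (h2 : hi ≤ t.length) :
    pvLoopB fuel t lo hi = pvLoopA fuel ((t.take hi).drop lo) := by
  induction fuel generalizing lo hi with
  | zero => rfl
  | succ fuel ih =>
    rw [pvLoopB, pvLoopA]
    by_cases hb : pvSwFrom t ['['] lo hi = true
    · rw [if_pos hb]
      have hb' : PySem.Chars.startswith ((t.take hi).drop lo) ['['] = true := by
        rw [← pvSwFrom_eq]; exact hb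
      rw [if_pos hb']
      have hk1 : (1 : Nat) ≤ hi - lo := by
        have hll := ((PySem.Chars.startswith_iff _ _).mp hb').length_le
        simp at hll
        omega
      obtain ⟨hs1, hl1, hh1⟩ := pvStepEq t lo hi 1 ']' h2 (by omega) hk1
      have hc1 : pvPeelBkA ((t.take hi).drop lo)
          = (t.take (pvCut t lo hi 1 ']').2).drop (pvCut t lo hi 1 ']').1 := by
        simpa [pvPeelBkA] using hs1
      set p := pvCut t lo hi 1 ']' with hp
      by_cases hi2 : pvSwFrom t ['!', '[', 'i', 'm', 'g', ']', '('] p.1 p.2 = true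
      · rw [if_pos hi2]
        have hi2' : PySem.Chars.startswith (pvPeelBkA ((t.take hi).drop lo))
            ['!', '[', 'i', 'm', 'g', ']', '('] = true := by
          rw [hc1, ← pvSwFrom_eq]; exact hi2
        rw [if_pos hi2']
        have hk7 : (7 : Nat) ≤ p.2 - p.1 := by
          have hll := ((PySem.Chars.startswith_iff _ _).mp
            ((pvSwFrom_eq t _ p.1 p.2) ▸ hi2)).length_le
          simp at hll
          have hd : (['!', '[', 'i', 'm', 'g', ']', '('] : List Char).length = 7 := rfl
          omega
        obtain ⟨hs2, hl2, hh2⟩ := pvStepEq t p.1 p.2 7 ')' (by omega) (by omega) hk7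
        have hc2 : pvPeelImgA (pvPeelBkA ((t.take hi).drop lo))
            = (t.take (pvCut t p.1 p.2 7 ')').2).drop (pvCut t p.1 p.2 7 ')').1 := by
          rw [hc1]
          simpa [pvPeelImgA] using hs2
        rw [hc2]
        exact ih (pvCut t p.1 p.2 7 ')').1 (pvCut t p.1 p.2 7 ')').2 hl2 (by omega)
      · rw [if_neg hi2]
        have hi2' : ¬ PySem.Chars.startswith (pvPeelBkA ((t.take hi).drop lo))
            ['!', '[', 'i', 'm', 'g', ']', '('] = true := by
          rw [hc1, ← pvSwFrom_eq]; exact hi2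
        rw [if_neg hi2', hc1]
        exact ih p.1 p.2 hl1 (by omega)
    · rw [if_neg hb]
      have hb' : ¬ PySem.Chars.startswith ((t.take hi).drop lo) ['['] = true := by
        rw [← pvSwFrom_eq]; exact hb
      rw [if_neg hb']
      by_cases hi2 : pvSwFrom t ['!', '[', 'i', 'm', 'g', ']', '('] lo hi = true
      · rw [if_pos hi2]
        have hi2' : PySem.Chars.startswith ((t.take hi).drop lo)
            ['!', '[', 'i', 'm', 'g', ']', '('] = true := by
          rw [← pvSwFrom_eq]; exact hi2
        rw [if_pos hi2']
        have hk7 : (7 : Nat) ≤ hi - lo := by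
          have hll := ((PySem.Chars.startswith_iff _ _).mp hi2').length_le
          simp at hll
          have hd : (['!', '[', 'i', 'm', 'g', ']', '('] : List Char).length = 7 := rfl
          omega
        obtain ⟨hs2, hl2, hh2⟩ := pvStepEq t lo hi 7 ')' h2 (by omega) hk7
        have hc2 : pvPeelImgA ((t.take hi).drop lo)
            = (t.take (pvCut t lo hi 7 ')').2).drop (pvCut t lo hi 7 ')').1 := by
          simpa [pvPeelImgA] using hs2
        rw [hc2]
        exact ih (pvCut t lo hi 7 ')').1 (pvCut t lo hi 7 ')').2 hl2 (by omega)
      · rw [if_neg hi2]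
        have hi2' : ¬ PySem.Chars.startswith ((t.take hi).drop lo)
            ['!', '[', 'i', 'm', 'g', ']', '('] = true := by
          rw [← pvSwFrom_eq]; exact hi2
        rw [if_neg hi2']

-- ===== VERDICT (by name: the statement is the Claim_ definition above) =====
theorem parentheses_remover_spec : Claim_equal_parentheses_remover := by
  intro s _
  unfold Spec_parentheses_remover parentheses_remover parentheses_remover_alt
  rw [pvLoopB_eq _ _ 0 _ (Nat.zero_le _) (le_refl _), List.take_length, List.drop_zero]
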